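-- pv_equiv track=rewrite | github.com/HanzoDev1375/Ghostide | core/src/main/assets/autocomplete.py | get_default_position
-- ===== SOURCE A (Python) =====
-- def get_default_position(code):
--     lines = code.splitlines()
--     if not lines:
--         return 1, 0
--
--     # از آخر به اول بگرد دنبال آخرین نقطه
--     for i in range(len(lines) - 1, -1, -1):
--         col = lines[i].rfind(".")
--         if col != -1:
--             return i + 1, col + 1  # jedi ستون رو یک واحد بعد از '.' می‌خواد
--
--     # اگر هیچ نقطه‌ای نبود، برگرد آخر فایل
--     return len(lines), len(lines[-1])
-- ===== SOURCE B (Python) =====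
-- def get_default_position(code):
--     idx = code.rfind(".")
--     if idx == -1:
--         lines = code.splitlines()
--         if not lines:
--             return 1, 0
--         return len(lines), len(lines[-1])
--     parts = code[:idx + 1].splitlines()
--     return len(parts), len(parts[-1])
-- ===== Notes on version B (the rewrite author's own statement) =====
-- stated objective: alternative
-- what changed: Replaces A's line-by-line backward loop (splitlines first, then a per-line reverse find of the dot) by one global reverse find of the dot over the whole string followed by a coordinate conversion: splitlines of the prefix ending at the found dot gives the line number and column directly; only the no-dot fallback still splits the whole string.
import Mathlib
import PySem

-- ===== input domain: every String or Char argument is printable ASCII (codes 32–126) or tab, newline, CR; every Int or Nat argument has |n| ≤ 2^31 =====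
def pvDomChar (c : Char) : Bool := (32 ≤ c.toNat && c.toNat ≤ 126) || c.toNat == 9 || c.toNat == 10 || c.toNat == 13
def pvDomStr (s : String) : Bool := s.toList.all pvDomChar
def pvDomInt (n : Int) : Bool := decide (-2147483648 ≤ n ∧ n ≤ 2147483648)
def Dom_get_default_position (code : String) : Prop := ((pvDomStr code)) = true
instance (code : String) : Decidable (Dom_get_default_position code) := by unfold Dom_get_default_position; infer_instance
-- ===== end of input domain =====

-- B replaces A's per-line backward scan by ONE global rfind('.') over the whole
-- string followed by a coordinate conversion (splitlines of the prefix up to the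
-- dot); objective: alternative (different algorithm, same return value).

-- ===== PORT A =====
-- the backward 'for i in range(len(lines)-1, -1, -1)' loop with early return
def pvLoopA_get_default_position (lines : List (List Char)) : List Int → Option (Int × Int)
  | [] => none
  | i :: rest =>
    let col := PySem.Chars.rfind (PySem.List.pyGetD lines i []) ['.']
    if col ≠ -1 then some (i + 1, col + 1)
    else pvLoopA_get_default_position lines rest

def get_default_position (code : String) : Int × Int :=
  let lines := PySem.Chars.splitlines code.toList
  if lines = [] then (1, 0)
  else
    match pvLoopA_get_default_position lines
        (PySem.List.pyRange ((lines.length : Int) - 1) (-1) (-1)) with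
    | some r => r
    | none => ((lines.length : Int), ((PySem.List.pyGetD lines (-1) []).length : Int))

-- ===== PORT B =====
def get_default_position_alt (code : String) : Int × Int :=
  let idx := PySem.Chars.rfind code.toList ['.']
  if idx = -1 then
    let lines := PySem.Chars.splitlines code.toList
    if lines = [] then (1, 0)
    else ((lines.length : Int), ((PySem.List.pyGetD lines (-1) []).length : Int))
  else
    let parts := PySem.Chars.splitlines (PySem.List.slice code.toList none (some (idx + 1)))
    ((parts.length : Int), ((PySem.List.pyGetD parts (-1) []).length : Int))

-- ===== PRECONDITION & SPEC =====
def Spec_get_default_position (code : String) (out : Int × Int) : Prop := out = get_default_position_alt code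
instance (code : String) (out : Int × Int) : Decidable (Spec_get_default_position code out) := by unfold Spec_get_default_position; infer_instance

-- ===== CLAIM (what is proved, stated in full; the proofs are below) =====
def Claim_equal_get_default_position : Prop := ∀ (code : String), Dom_get_default_position code → Spec_get_default_position code (get_default_position code)

-- ===== LEMMAS AND PROOFS =====

-- range(n-1, -1, -1) is the reversed 0..n-1
theorem pvRange_down (n : Nat) :
    PySem.List.pyRange ((n : Int) - 1) (-1) (-1) = (List.range n).reverse.map (fun k => ((k : Nat) : Int)) := by
  rw [List.map_reverse]
  unfold PySem.List.pyRange
  rcases Nat.eq_zero_or_pos n with h | h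
  · subst h; simp
  · have h2 : (-1:Int) < (n:Int) - 1 := by omega
    have hc : ((((n:Int) - 1 - -1 + - -1 - 1) / - -1)).toNat = n := by
      have h3 : (((n:Int) - 1 - -1 + - -1 - 1) / - -1) = (n:Int) := by ring_nf; simp
      rw [h3]; exact Int.toNat_natCast n
    simp only [if_neg (by norm_num : ¬ (-1:Int) = 0), if_neg (by norm_num : ¬ ((0:Int) < -1)), if_pos h2, hc]
    apply List.ext_getElem
    · simp
    · intro i hi1 hi2
      have hin : i < n := by simpa using hi1
      simp only [List.getElem_reverse, List.getElem_map, List.length_map, List.length_range, List.getElem_range]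
      omega

-- the boundary predicate of PySem.Chars.splitlines, named
def pvIsB (c : Char) : Bool :=
  have n := c.toNat
  decide (n = 10) || decide (n = 13) || decide (n = 11) || decide (n = 12) || decide (n = 28) || decide (n = 29) ||
    decide (n = 30) || decide (n = 133) || decide (n = 8232) || decide (n = 8233)

-- mirror of PySem.Chars.splitlines.go with usable equations
def pvGo (isB : Char → Bool) : List Char → List Char → List (List Char) → List (List Char)
  | [], cur, acc => if cur.isEmpty then acc.reverse else (cur.reverse :: acc).reverse
  | '\x0d' :: '\n' :: rest, cur, acc => pvGo isB rest [] (cur.reverse :: acc)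
  | c :: rest, cur, acc => if isB c then pvGo isB rest [] (cur.reverse :: acc) else pvGo isB rest (c :: cur) acc

-- the state (current line, emitted lines) after consuming a chunk of input
def pvSt (isB : Char → Bool) : List Char → List Char → List (List Char) → List Char × List (List Char)
  | [], cur, acc => (cur, acc)
  | '\x0d' :: '\n' :: rest, cur, acc => pvSt isB rest [] (cur.reverse :: acc)
  | c :: rest, cur, acc => if isB c then pvSt isB rest [] (cur.reverse :: acc) else pvSt isB rest (c :: cur) acc

theorem pvGo_eq (isB : Char → Bool) (x cur acc) :
    PySem.Chars.splitlines.go isB x cur acc = pvGo isB x cur acc := by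
  fun_induction pvGo isB x cur acc <;>
    rw [PySem.Chars.splitlines.go.eq_def] <;> split <;> simp_all <;>
    (rename_i hno heq ih; exact absurd heq.2.symm (hno _ heq.1.symm))

theorem pv_splitlines_eq (s : List Char) :
    PySem.Chars.splitlines s = pvGo pvIsB s [] [] := by
  unfold PySem.Chars.splitlines
  exact pvGo_eq _ s [] []

theorem pvGo_cons (isB : Char → Bool) (c : Char) (rest cur : List Char) (acc : List (List Char))
    (h : c = '\x0d' → rest.head? ≠ some '\n') :
    pvGo isB (c :: rest) cur acc =
      if isB c then pvGo isB rest [] (cur.reverse :: acc) else pvGo isB rest (c :: cur) acc := by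
  rw [pvGo.eq_def]
  split
  all_goals first
    | (rename_i heq; exact absurd heq (List.cons_ne_nil _ _))
    | (exact absurd rfl (h rfl))
    | (rename_i hno heq
       obtain ⟨h1, h2⟩ := List.cons_eq_cons.mp heq
       subst h1; subst h2; rfl)
    | (rename_i rest' heq
       obtain ⟨h1, h2⟩ := List.cons_eq_cons.mp heq
       exact absurd (by rw [h2]; rfl) (h h1))

theorem pvSt_cons (isB : Char → Bool) (c : Char) (rest cur : List Char) (acc : List (List Char))
    (h : c = '\x0d' → rest.head? ≠ some '\n') :
    pvSt isB (c :: rest) cur acc =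
      if isB c then pvSt isB rest [] (cur.reverse :: acc) else pvSt isB rest (c :: cur) acc := by
  rw [pvSt.eq_def]
  split
  all_goals first
    | (rename_i heq; exact absurd heq (List.cons_ne_nil _ _))
    | (exact absurd rfl (h rfl))
    | (rename_i hno heq
       obtain ⟨h1, h2⟩ := List.cons_eq_cons.mp heq
       subst h1; subst h2; rfl)
    | (rename_i rest' heq
       obtain ⟨h1, h2⟩ := List.cons_eq_cons.mp heq
       exact absurd (by rw [h2]; rfl) (h h1))

theorem pvGo_crlf (isB : Char → Bool) (rest cur : List Char) (acc : List (List Char)) :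
    pvGo isB ('\x0d' :: '\n' :: rest) cur acc = pvGo isB rest [] (cur.reverse :: acc) := rfl

theorem pvSt_crlf (isB : Char → Bool) (rest cur : List Char) (acc : List (List Char)) :
    pvSt isB ('\x0d' :: '\n' :: rest) cur acc = pvSt isB rest [] (cur.reverse :: acc) := rfl

-- shape induction following the splitlines pattern match
theorem pvShape_induction (P : List Char → Prop)
    (h0 : P [])
    (hcrlf : ∀ rest, P rest → P ('\x0d' :: '\n' :: rest))
    (hcons : ∀ c rest, (c = '\x0d' → rest.head? ≠ some '\n') → P rest → P (c :: rest)) :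
    ∀ x, P x := by
  have key : ∀ n x, List.length x ≤ n → P x := by
    intro n
    induction n with
    | zero =>
      intro x hx
      have : x = [] := List.eq_nil_of_length_eq_zero (by omega)
      subst this; exact h0
    | succ n ih =>
      intro x hx
      rcases x with _ | ⟨c, rest⟩
      · exact h0
      · by_cases hc : c = '\x0d' ∧ rest.head? = some '\n'
        · obtain ⟨hc1, hc2⟩ := hc
          rcases rest with _ | ⟨r, rest'⟩
          · simp at hc2
          · simp at hc2
            subst hc1; subst hc2
            exact hcrlf rest' (ih rest' (by simp at hx; omega))
        · exact hcons c rest (fun h1 h2 => hc ⟨h1, h2⟩) (ih rest (by simp at hx; omega))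
  intro x; exact key x.length x le_rfl

-- the accumulator just prepends (reversed)
theorem pvGo_acc (isB : Char → Bool) (x : List Char) :
    ∀ cur acc, pvGo isB x cur acc = acc.reverse ++ pvGo isB x cur [] := by
  induction x using pvShape_induction with
  | h0 =>
    intro cur acc
    simp only [pvGo]
    by_cases h : cur.isEmpty <;> simp [h]
  | hcrlf rest ih =>
    intro cur acc
    rw [pvGo_crlf, ih [] (cur.reverse :: acc)]
    conv_rhs => rw [pvGo_crlf, ih [] [cur.reverse]]
    simp
  | hcons c rest h ih =>
    intro cur acc
    rw [pvGo_cons isB c rest cur acc h, pvGo_cons isB c rest cur [] h]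
    by_cases hb : isB c
    · simp only [hb, if_true]
      rw [ih [] (cur.reverse :: acc), ih [] [cur.reverse]]
      simp
    · simp only [hb, Bool.false_eq_true, if_false]
      exact ih (c :: cur) acc

-- every character of every produced line comes from the input, the current line or the accumulator
theorem pvGo_mem (isB : Char → Bool) (x : List Char) :
    ∀ cur acc l, l ∈ pvGo isB x cur acc → ∀ ch ∈ l, ch ∈ x ∨ ch ∈ cur ∨ ∃ l' ∈ acc, ch ∈ l' := by
  induction x using pvShape_induction with
  | h0 =>
    intro cur acc l hl ch hch
    simp only [pvGo] at hl
    by_cases h : cur.isEmpty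
    · simp [h] at hl
      exact Or.inr (Or.inr ⟨l, hl, hch⟩)
    · simp [h] at hl
      rcases hl with hl | hl
      · exact Or.inr (Or.inr ⟨l, hl, hch⟩)
      · subst hl; exact Or.inr (Or.inl (by simpa using hch))
  | hcrlf rest ih =>
    intro cur acc l hl ch hch
    rw [pvGo_crlf] at hl
    rcases ih [] (cur.reverse :: acc) l hl ch hch with h | h | ⟨l', hl', hch'⟩
    · exact Or.inl (by simp [h])
    · simp at h
    · rcases List.mem_cons.mp hl' with h | h
      · subst h; exact Or.inr (Or.inl (by simpa using hch'))
      · exact Or.inr (Or.inr ⟨l', h, hch'⟩)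
  | hcons c rest h ih =>
    intro cur acc l hl ch hch
    rw [pvGo_cons isB c rest cur acc h] at hl
    by_cases hb : isB c
    · simp only [hb, if_true] at hl
      rcases ih [] (cur.reverse :: acc) l hl ch hch with h' | h' | ⟨l', hl', hch'⟩
      · exact Or.inl (by simp [h'])
      · simp at h'
      · rcases List.mem_cons.mp hl' with h' | h'
        · subst h'; exact Or.inr (Or.inl (by simpa using hch'))
        · exact Or.inr (Or.inr ⟨l', h', hch'⟩)
    · simp only [hb, Bool.false_eq_true, if_false] at hl
      rcases ih (c :: cur) acc l hl ch hch with h' | h' | h'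
      · exact Or.inl (by simp [h'])
      · rcases List.mem_cons.mp h' with h' | h'
        · exact Or.inl (by simp [h'])
        · exact Or.inr (Or.inl h')
      · exact Or.inr (Or.inr h')

-- with a nonempty current line, the first produced line starts with it
theorem pvGo_first (isB : Char → Bool) (v : List Char) :
    ∀ cur, cur ≠ [] → ∃ w rest, pvGo isB v cur [] = (cur.reverse ++ w) :: rest ∧
      (∀ ch ∈ w, ch ∈ v) ∧ (∀ l ∈ rest, ∀ ch ∈ l, ch ∈ v) := by
  induction v using pvShape_induction with
  | h0 =>
    intro cur hc
    refine ⟨[], [], ?_, by simp, by simp⟩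
    simp [pvGo, List.isEmpty_iff, hc]
  | hcrlf rest ih =>
    intro cur hc
    refine ⟨[], pvGo isB rest [] [], ?_, by simp, ?_⟩
    · rw [pvGo_crlf, pvGo_acc]
      simp
    · intro l hl ch hch
      rcases pvGo_mem isB rest [] [] l hl ch hch with h | h | h
      · simp [h]
      · simp at h
      · simp at h
  | hcons c rest h ih =>
    intro cur hc
    rw [pvGo_cons isB c rest cur [] h]
    by_cases hb : isB c
    · refine ⟨[], pvGo isB rest [] [], ?_, by simp, ?_⟩
      · simp only [hb, if_true]
        rw [pvGo_acc]
        simp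
      · intro l hl ch hch
        rcases pvGo_mem isB rest [] [] l hl ch hch with h' | h' | h'
        · simp [h']
        · simp at h'
        · simp at h'
    · obtain ⟨w, rest', heq, hw, hrest⟩ := ih (c :: cur) (by simp)
      refine ⟨c :: w, rest', ?_, ?_, ?_⟩
      · simp only [hb, Bool.false_eq_true, if_false]
        rw [heq]
        simp
      · intro ch hch
        rcases List.mem_cons.mp hch with h' | h'
        · simp [h']
        · simp [hw ch h']
      · intro l hl ch hch
        simp [hrest l hl ch hch]

-- processing a concatenation = processing pieces, as long as no CR/LF pair spans the seam
theorem pvSt_comp (isB : Char → Bool) (x : List Char) :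
    ∀ y cur acc, (x.getLast? = some '\x0d' → y.head? ≠ some '\n') →
      pvSt isB (x ++ y) cur acc = pvSt isB y (pvSt isB x cur acc).1 (pvSt isB x cur acc).2 := by
  induction x using pvShape_induction with
  | h0 => intro y cur acc _; rfl
  | hcrlf rest ih =>
    intro y cur acc hlast
    rw [List.cons_append, List.cons_append, pvSt_crlf, pvSt_crlf]
    rcases rest with _ | ⟨r, rest'⟩
    · exact ih y [] (cur.reverse :: acc) (by simp)
    · exact ih y [] (cur.reverse :: acc)
        (by intro h1; exact hlast (by rw [List.getLast?_cons_cons]; exact h1))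
  | hcons c rest h ih =>
    intro y cur acc hlast
    have hx : ((c :: rest) ++ y) = c :: (rest ++ y) := by simp
    have hhead : c = '\x0d' → (rest ++ y).head? ≠ some '\n' := by
      intro hc
      rcases rest with _ | ⟨r, rest'⟩
      · simpa using hlast (by simp [hc])
      · simpa using h hc
    have hlast' : rest.getLast? = some '\x0d' → y.head? ≠ some '\n' := by
      intro h1
      rcases rest with _ | ⟨r, rest'⟩
      · simp at h1
      · exact hlast (by rw [List.getLast?_cons_cons]; exact h1)
    rw [hx, pvSt_cons isB c (rest ++ y) cur acc hhead, pvSt_cons isB c rest cur acc h]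
    by_cases hb : isB c
    · simp only [hb, if_true]; exact ih y [] (cur.reverse :: acc) hlast'
    · simp only [hb, Bool.false_eq_true, if_false]; exact ih y (c :: cur) acc hlast'

theorem pvGo_comp (isB : Char → Bool) (x : List Char) :
    ∀ y cur acc, (x.getLast? = some '\x0d' → y.head? ≠ some '\n') →
      pvGo isB (x ++ y) cur acc = pvGo isB y (pvSt isB x cur acc).1 (pvSt isB x cur acc).2 := by
  induction x using pvShape_induction with
  | h0 => intro y cur acc _; rfl
  | hcrlf rest ih =>
    intro y cur acc hlast
    rw [List.cons_append, List.cons_append, pvGo_crlf, pvSt_crlf]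
    rcases rest with _ | ⟨r, rest'⟩
    · exact ih y [] (cur.reverse :: acc) (by simp)
    · exact ih y [] (cur.reverse :: acc)
        (by intro h1; exact hlast (by rw [List.getLast?_cons_cons]; exact h1))
  | hcons c rest h ih =>
    intro y cur acc hlast
    have hx : ((c :: rest) ++ y) = c :: (rest ++ y) := by simp
    have hhead : c = '\x0d' → (rest ++ y).head? ≠ some '\n' := by
      intro hc
      rcases rest with _ | ⟨r, rest'⟩
      · simpa using hlast (by simp [hc])
      · simpa using h hc
    have hlast' : rest.getLast? = some '\x0d' → y.head? ≠ some '\n' := by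
      intro h1
      rcases rest with _ | ⟨r, rest'⟩
      · simp at h1
      · exact hlast (by rw [List.getLast?_cons_cons]; exact h1)
    rw [hx, pvGo_cons isB c (rest ++ y) cur acc hhead, pvSt_cons isB c rest cur acc h]
    by_cases hb : isB c
    · simp only [hb, if_true]; exact ih y [] (cur.reverse :: acc) hlast'
    · simp only [hb, Bool.false_eq_true, if_false]; exact ih y (c :: cur) acc hlast'

-- a singleton is no prefix of a list not containing it
theorem pvPrefix_singleton_false (c : Char) (t : List Char) (h : c ∉ t) :
    (([c] : List Char).isPrefixOf t) = false := by
  cases t with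
  | nil => rfl
  | cons b tb =>
    simp only [List.isPrefixOf, Bool.and_true, beq_eq_false_iff_ne, ne_eq]
    exact fun hb => h (List.mem_cons.mpr (Or.inl hb))

-- rfind of '.' in a dot-free list is -1
theorem pvRfindGo_notMem (s : List Char) (h : '.' ∉ s) : ∀ n, PySem.Chars.rfind.go s ['.'] n = -1 := by
  intro n
  induction n with
  | zero =>
    show (if ['.'].isPrefixOf s then (0:Int) else -1) = -1
    simp [pvPrefix_singleton_false '.' s h]
  | succ j ih =>
    show (if ['.'].isPrefixOf (List.drop (j+1) s) then ((j:Int)+1) else PySem.Chars.rfind.go s ['.'] j) = -1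
    have hp : (['.'].isPrefixOf (List.drop (j+1) s)) = false :=
      pvPrefix_singleton_false _ _ (fun hin => h (List.mem_of_mem_drop hin))
    simp [hp, ih]

theorem pvRfind_notMem (s : List Char) (h : '.' ∉ s) : PySem.Chars.rfind s ['.'] = -1 := by
  unfold PySem.Chars.rfind
  exact pvRfindGo_notMem s h _

-- rfind of '.' when the last dot is known: s = u ++ '.' :: v with no dot in v
theorem pvRfindGo_last (u v : List Char) (hv : '.' ∉ v) :
    ∀ m, PySem.Chars.rfind.go (u ++ '.' :: v) ['.'] (u.length + m) = (u.length : Int) := by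
  intro m
  induction m with
  | zero =>
    show PySem.Chars.rfind.go (u ++ '.' :: v) ['.'] u.length = (u.length : Int)
    rcases hu : u.length with _ | j
    · have hnil : u = [] := List.eq_nil_of_length_eq_zero hu
      subst hnil
      show (if ['.'].isPrefixOf ('.' :: v) then (0:Int) else -1) = ((0:Nat) : Int)
      simp [List.isPrefixOf]
    · show (if ['.'].isPrefixOf (List.drop (j+1) (u ++ '.' :: v)) then ((j:Int)+1) else
          PySem.Chars.rfind.go (u ++ '.' :: v) ['.'] j) = ((j+1 : Nat) : Int)
      have hdrop : List.drop (j+1) (u ++ '.' :: v) = '.' :: v := by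
        rw [← hu, List.drop_left]
      rw [hdrop]
      simp [List.isPrefixOf]
  | succ m ih =>
    have harith : u.length + (m + 1) = (u.length + m) + 1 := by omega
    rw [harith]
    show (if ['.'].isPrefixOf (List.drop ((u.length + m)+1) (u ++ '.' :: v)) then ((((u.length + m) : Nat):Int)+1) else
        PySem.Chars.rfind.go (u ++ '.' :: v) ['.'] (u.length + m)) = (u.length : Int)
    have hdrop : List.drop ((u.length + m) + 1) (u ++ '.' :: v) = List.drop m v := by
      rw [List.drop_append]
      have h1 : List.drop (u.length + m + 1) u = [] := List.drop_eq_nil_of_le (by omega)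
      have h2 : u.length + m + 1 - u.length = m + 1 := by omega
      rw [h1, h2]
      simp
    have hp : (['.'].isPrefixOf (List.drop ((u.length + m) + 1) (u ++ '.' :: v))) = false := by
      rw [hdrop]
      exact pvPrefix_singleton_false _ _ (fun hin => hv (List.mem_of_mem_drop hin))
    simp only [hp, Bool.false_eq_true, if_false]
    exact ih

theorem pvRfind_last (u v : List Char) (hv : '.' ∉ v) :
    PySem.Chars.rfind (u ++ '.' :: v) ['.'] = (u.length : Int) := by
  unfold PySem.Chars.rfind
  have hlen : (u ++ '.' :: v).length = u.length + (v.length + 1) := by simp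
  rw [hlen]
  exact pvRfindGo_last u v hv (v.length + 1)

-- decompose a list at its last dot
theorem pvLastDot (s : List Char) (h : '.' ∈ s) : ∃ u v, s = u ++ '.' :: v ∧ '.' ∉ v := by
  induction s using List.reverseRecOn with
  | nil => simp at h
  | append_singleton xs x ih =>
    by_cases hx : x = '.'
    · exact ⟨xs, [], by simp [hx], by simp⟩
    · have hxs : '.' ∈ xs := by
        rcases List.mem_append.mp h with h' | h'
        · exact h'
        · simp at h'; exact absurd h'.symm hx
      obtain ⟨u, v, heq, hv⟩ := ih hxs
      exact ⟨u, v ++ [x], by rw [heq]; simp, by simp [hv]; exact fun h' => hx h'.symm⟩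

-- xs[-1] with default is getLast?.getD
theorem pvPyGetD_neg_one {α : Type} (xs : List α) (d : α) :
    PySem.List.pyGetD xs (-1) d = xs.getLast?.getD d := by
  rcases xs with _ | ⟨a, t⟩
  · rfl
  · simp only [PySem.List.pyGetD, PySem.List.pyGet?, PySem.List.pyIdx?]
    have h1 : ¬ ((0:Int) ≤ -1) := by omega
    have h2 : -(((a :: t).length : Int)) ≤ -1 := by simp
    rw [if_neg h1, if_pos h2]
    have h3 : (a :: t).length - ((-(-1:Int)).toNat) = t.length := by simp
    rw [h3, List.getLast?_eq_getElem?]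
    simp

-- a pyGetD result is the default or a member
theorem pvPyGetD_mem {α : Type} (xs : List α) (i : Int) (d : α) :
    PySem.List.pyGetD xs i d = d ∨ PySem.List.pyGetD xs i d ∈ xs := by
  simp only [PySem.List.pyGetD, PySem.List.pyGet?]
  rcases hk : PySem.List.pyIdx? xs.length i with _ | k
  · simp
  · rcases hg : xs[k]? with _ | x
    · simp [hg]
    · have : ((some k).bind (fun j => xs[j]?)).getD d = x := by simp [hg]
      rw [this]
      exact Or.inr (List.mem_of_getElem? hg)

-- the backward loop skips indices whose line has no dot
theorem pvLoop_skip (lines : List (List Char)) (idxs : List Int)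
    (h : ∀ i ∈ idxs, PySem.Chars.rfind (PySem.List.pyGetD lines i []) ['.'] = -1) :
    pvLoopA_get_default_position lines idxs = none := by
  induction idxs with
  | nil => rfl
  | cons i rest ih =>
    simp only [pvLoopA_get_default_position]
    rw [h i (List.mem_cons_self ..)]
    simp only [ne_eq, not_true_eq_false, reduceIte]
    exact ih (fun j hj => h j (List.mem_cons_of_mem _ hj))

theorem pvLoop_skip_prefix (lines : List (List Char)) (idxs₁ idxs₂ : List Int)
    (h : ∀ i ∈ idxs₁, PySem.Chars.rfind (PySem.List.pyGetD lines i []) ['.'] = -1) :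
    pvLoopA_get_default_position lines (idxs₁ ++ idxs₂) = pvLoopA_get_default_position lines idxs₂ := by
  induction idxs₁ with
  | nil => rfl
  | cons i rest ih =>
    simp only [List.cons_append, pvLoopA_get_default_position]
    rw [h i (List.mem_cons_self ..)]
    simp only [ne_eq, not_true_eq_false, reduceIte]
    exact ih (fun j hj => h j (List.mem_cons_of_mem _ hj))

-- ===== VERDICT (by name: the statement is the Claim_ definition above) =====
theorem get_default_position_spec : Claim_equal_get_default_position := by
  intro code _
  unfold Spec_get_default_position get_default_position get_default_position_alt
  by_cases hdot : '.' ∈ code.toList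
  case neg =>
    -- no dot anywhere: B's rfind = -1 and A's loop never fires
    have hr : PySem.Chars.rfind code.toList ['.'] = -1 := pvRfind_notMem _ hdot
    have hnone : pvLoopA_get_default_position (PySem.Chars.splitlines code.toList)
        (PySem.List.pyRange (((PySem.Chars.splitlines code.toList).length : Int) - 1) (-1) (-1)) = none := by
      apply pvLoop_skip
      intro i _
      rcases pvPyGetD_mem (PySem.Chars.splitlines code.toList) i ([] : List Char) with h | h
      · rw [h]; exact pvRfind_notMem _ (by simp)
      · apply pvRfind_notMem
        intro hin
        rw [pv_splitlines_eq] at h hin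
        rcases pvGo_mem pvIsB code.toList [] [] _ h '.' hin with h' | h' | h'
        · exact hdot h'
        · simp at h'
        · simp at h'
    simp [hr, hnone]
  case pos =>
    obtain ⟨u, v, hs, hv⟩ := pvLastDot _ hdot
    -- B's global rfind finds the dot at flat index u.length
    have hr : PySem.Chars.rfind code.toList ['.'] = (u.length : Int) := by
      rw [hs]; exact pvRfind_last u v hv
    have hne : ((u.length : Int)) ≠ -1 := by omega
    -- B's prefix  code[:idx+1]  is  u ++ ['.']
    have hslice : PySem.List.slice code.toList none (some ((u.length : Int) + 1)) = u ++ ['.'] := by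
      have hcast : ((u.length : Int) + 1) = ((u.length + 1 : Nat) : Int) := by push_cast; ring
      rw [hcast, PySem.List.slice_to_natCast, hs, List.take_append]
      have h2 : List.take (u.length + 1) u = u := List.take_of_length_le (by omega)
      have h3 : u.length + 1 - u.length = 1 := by omega
      rw [h2, h3]
      simp
    -- the state after consuming u
    set c : List Char := (pvSt pvIsB u [] []).1 with hc
    set a : List (List Char) := (pvSt pvIsB u [] []).2 with ha
    -- B's parts
    have hparts : PySem.Chars.splitlines (u ++ ['.']) = a.reverse ++ [c.reverse ++ ['.']] := by
      rw [pv_splitlines_eq, pvGo_comp pvIsB u ['.'] [] [] (by simp)]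
      rw [← hc, ← ha]
      rw [pvGo_cons pvIsB '.' [] c a (by simp)]
      have hb : pvIsB '.' = false := by decide
      rw [hb]
      simp [pvGo]
    -- A's line list
    have hstu : pvSt pvIsB (u ++ ['.']) [] [] = ('.' :: c, a) := by
      rw [pvSt_comp pvIsB u ['.'] [] [] (by simp)]
      rw [← hc, ← ha]
      rw [pvSt_cons pvIsB '.' [] c a (by simp)]
      have hb : pvIsB '.' = false := by decide
      rw [hb]
      simp [pvSt]
    obtain ⟨w, rest, hfirst, hw, hrest⟩ := pvGo_first pvIsB v ('.' :: c) (by simp)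
    have hlines : PySem.Chars.splitlines code.toList =
        a.reverse ++ ((c.reverse ++ '.' :: w) :: rest) := by
      rw [hs, pv_splitlines_eq]
      have hsplit : u ++ '.' :: v = (u ++ ['.']) ++ v := by simp
      rw [hsplit, pvGo_comp pvIsB (u ++ ['.']) v [] [] (by simp), hstu]
      rw [pvGo_acc, hfirst]
      simp
    set lines := PySem.Chars.splitlines code.toList with hl
    have hlnil : lines ≠ [] := by rw [hlines]; simp
    have hlen : lines.length = (a.length + 1) + rest.length := by rw [hlines]; simp; omega
    -- A's backward loop: the top rest.length indices are dot-free, index a.length hits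
    have hloop : pvLoopA_get_default_position lines
        (PySem.List.pyRange ((lines.length : Int) - 1) (-1) (-1)) =
        some ((a.length : Int) + 1, (c.length : Int) + 1) := by
      rw [pvRange_down, hlen, List.range_add, List.range_succ]
      simp only [List.reverse_append, List.map_append, List.map_reverse, List.map_map]
      rw [pvLoop_skip_prefix]
      · -- the hit at index a.length
        rw [show (List.map (fun k => ((k:Nat):Int)) [a.length]).reverse = [((a.length : Nat) : Int)] by simp,
          List.singleton_append]
        simp only [pvLoopA_get_default_position]
        have hget : PySem.List.pyGetD lines ((a.length : Nat) : Int) [] = c.reverse ++ '.' :: w := by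
          rw [PySem.List.pyGetD_natCast, hlines, List.getD_eq_getElem?_getD]
          rw [List.getElem?_append_right (by simp)]
          simp
        rw [hget]
        have hcol : PySem.Chars.rfind (c.reverse ++ '.' :: w) ['.'] = (c.reverse.length : Int) := by
          apply pvRfind_last
          intro hin
          exact hv (hw '.' hin)
        rw [hcol]
        have : ((c.reverse.length : Nat) : Int) ≠ -1 := by omega
        simp only [ne_eq, this, not_false_eq_true, if_pos]
        simp
      · -- the skipped high indices
        intro i hi
        simp only [List.mem_reverse, List.mem_map, List.mem_range] at hi
        obtain ⟨j, hj, rfl⟩ := hi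
        simp only [Function.comp_apply]
        have hget : PySem.List.pyGetD lines (((a.length + 1 + j : Nat)) : Int) [] = rest[j] := by
          rw [PySem.List.pyGetD_natCast, hlines, List.getD_eq_getElem?_getD]
          rw [List.getElem?_append_right (by simp; omega)]
          have : a.length + 1 + j - a.reverse.length = j + 1 := by simp; omega
          rw [this]
          simp [hj]
        rw [hget]
        apply pvRfind_notMem
        intro hin
        exact hv (hrest _ (List.getElem_mem hj) '.' hin)
    -- assemble both sides
    rw [hr, if_neg hne, hslice, hparts, if_neg hlnil, hloop]
    simp [pvPyGetD_neg_one]
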